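-- pv_equiv track=rewrite | github.com/gbud/Fundamentals-of-CS-and-Programming | week11_midterm2/practice_midterm2.py | makeWordLadder
-- ===== SOURCE A (Python) =====
-- import copy
-- import copy
--
-- def makeWordLadder(L):
--     if L == []: return []
--     for word in L:
--         newList = []
--         listCopy = copy.copy(L)
--         newList.append(word)
--         listCopy.remove(word)
--         solution = makeWordLadderHelper(listCopy, newList)
--         if solution == None:
--             continue
--         else: return solution
--     return None
--
-- def makeWordLadderHelper(L, newList):
--     if L == []:
--         return newList
--     else:
--         for i in range(len(L)):
--             word1 = newList[-1]
--             word2 = L[i]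
--             if word1[-1] == word2[0]:
--                 newList.append(word2)
--                 L.remove(word2)
--                 solution = makeWordLadderHelper(L, newList)
--                 if solution != None:
--                     return solution
--                 newList.remove(word2)
--                 L.append(word2)
--         return None
-- ===== SOURCE B (Python) =====
-- def makeWordLadder(L):
--     # Iterative DFS: one explicit stack of suspended loop frames instead of
--     # nested recursion with in-place mutation/undo.
--     if L == []:
--         return []
--
--     def wf(xs, w):  # xs without the first occurrence of w
--         j = xs.index(w)
--         return xs[:j] + xs[j + 1:]
--
--     for start in L:
--         rem = wf(L, start)
--         path = [start]
--         stack = []          # suspended frames (i, w)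
--         entering = True
--         result = None
--         while True:
--             if entering:
--                 if rem == []:
--                     result = path
--                     break
--                 i = 0
--                 entering = False
--             elif i < len(rem):
--                 w = rem[i]
--                 if path[-1][-1] == w[0]:
--                     stack.append((i, w))
--                     rem = wf(rem, w)
--                     path = path + [w]
--                     entering = True
--                 else:
--                     i = i + 1
--             else:
--                 if stack == []:
--                     break
--                 j, w = stack.pop()
--                 rem = rem + [w]
--                 path = wf(path, w)
--                 i = j + 1
--         if result is not None:
--             return result
--     return None
-- ===== Notes on version B (the rewrite author's own statement) =====
-- stated objective: alternative
-- what changed: Replaces A's nested backtracking recursion with in-place list mutation and undo (remove/append pairs) by an iterative DFS driven by an explicit stack of suspended loop frames over immutable (remaining, chain) registers.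
import Mathlib
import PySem

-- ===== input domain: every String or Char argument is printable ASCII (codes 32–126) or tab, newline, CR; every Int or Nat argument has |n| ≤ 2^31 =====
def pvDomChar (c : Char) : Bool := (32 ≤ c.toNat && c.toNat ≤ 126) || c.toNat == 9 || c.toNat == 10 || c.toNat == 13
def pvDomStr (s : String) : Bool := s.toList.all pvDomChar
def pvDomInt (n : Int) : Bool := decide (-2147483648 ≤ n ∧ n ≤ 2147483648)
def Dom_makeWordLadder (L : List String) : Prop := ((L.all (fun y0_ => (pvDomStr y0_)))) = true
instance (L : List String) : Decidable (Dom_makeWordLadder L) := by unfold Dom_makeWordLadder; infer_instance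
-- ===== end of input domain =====

-- B replaces A's nested backtracking recursion (in-place mutation with undo) by an
-- iterative DFS over an explicit stack of suspended loop frames; same return value.

-- ===== PORT A =====
-- A's helper mutates its two list arguments in place; on failure each remove/append
-- pair has restored a PERMUTATION of the entry lists, which the caller goes on using.
-- The port therefore returns, besides the optional solution, the final values of the
-- two lists; the Perm proof attached to them is what makes the recursion terminate.
mutual
def helperA (L nl : List String) :
    List String ⊕ {p : List String × List String // p.1.Perm L ∧ p.2.Perm nl} :=
  if _hL : L = [] then Sum.inl nl
  else loopA L nl 0 L.length
termination_by (L.length, L.length + 1)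
decreasing_by exact Prod.Lex.right _ (by omega)

def loopA (L nl : List String) (i n : Nat) :
    List String ⊕ {p : List String × List String // p.1.Perm L ∧ p.2.Perm nl} :=
  if h : i < n then
    match PySem.List.pyGet? nl (-1) with
    | none => Sum.inr ⟨(L, nl), List.Perm.refl _, List.Perm.refl _⟩  -- newList[-1]: IndexError (nl never empty on real runs)
    | some word1 =>
      match PySem.List.pyGet? L (i : Int) with
      | none => Sum.inr ⟨(L, nl), List.Perm.refl _, List.Perm.refl _⟩  -- L[i]: i < n = len L on real runs
      | some word2 =>
        match PySem.Str.pyGet? word1 (-1), PySem.Str.pyGet? word2 0 with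
        | some c1, some c2 =>
          if c1 = c2 then
            -- L.remove(word2) removes the first occurrence = List.erase; word2 was just
            -- read from L, so the ValueError branch (word2 ∉ L) is dead
            if hmem : word2 ∈ L then
              match helperA (L.erase word2) (nl ++ [word2]) with
              | Sum.inl s => Sum.inl s
              | Sum.inr ⟨(L3, nl3), hp⟩ =>
                -- newList.remove(word2): word2 ∈ nl3 since nl3 ~ nl ++ [word2]
                if hmem2 : word2 ∈ nl3 then
                  match loopA (L3 ++ [word2]) (nl3.erase word2) (i + 1) n with
                  | Sum.inl s => Sum.inl s
                  | Sum.inr ⟨p, hq⟩ =>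
                    Sum.inr ⟨p, by
                      constructor
                      · exact hq.1.trans ((hp.1.append_right [word2]).trans
                          ((List.perm_append_singleton _ _).trans
                            (List.perm_cons_erase hmem).symm))
                      · refine hq.2.trans ?_
                        refine ((hp.2.erase word2).trans ?_)
                        refine (((List.perm_append_singleton word2 nl).erase word2).trans ?_)
                        simp⟩
                else Sum.inr ⟨(L, nl), List.Perm.refl _, List.Perm.refl _⟩  -- dead branch
            else Sum.inr ⟨(L, nl), List.Perm.refl _, List.Perm.refl _⟩  -- dead branch
          else loopA L nl (i + 1) n
        | _, _ => Sum.inr ⟨(L, nl), List.Perm.refl _, List.Perm.refl _⟩  -- word1[-1]/word2[0]: IndexError on an empty word (excluded by Pre_)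
  else Sum.inr ⟨(L, nl), List.Perm.refl _, List.Perm.refl _⟩
termination_by (L.length, n - i)
decreasing_by
  · have h5 := List.length_erase_of_mem hmem
    have h6 := List.length_pos_of_mem hmem
    exact Prod.Lex.left _ _ (by omega)
  · have h5 := List.length_erase_of_mem hmem
    have h6 := List.length_pos_of_mem hmem
    have h7 : L3.length = (L.erase word2).length := hp.1.length_eq
    have h8 : (L3 ++ [word2]).length = L.length := by
      simp only [List.length_append, List.length_singleton]
      omega
    rw [h8]
    exact Prod.Lex.right _ (by omega)
  · exact Prod.Lex.right _ (by omega)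
end

def outerA (L : List String) : List String → Option (List String)
  | [] => none
  | w :: ws =>
    match PySem.List.remove? L w with
    | none => outerA L ws  -- listCopy.remove(word): unreachable, word ∈ L
    | some lc =>
      match helperA lc [w] with
      | Sum.inl s => some s
      | Sum.inr _ => outerA L ws

def makeWordLadder (L : List String) : Option (List String) :=
  if L = [] then some [] else outerA L L

-- ===== PORT B =====
-- Source B's wf(xs, w) = xs[:xs.index(w)] + xs[xs.index(w)+1:] (take/drop are exact for
-- the natural index bounds 0 ≤ j ≤ len; w is a member at every call site).
def wfB (xs : List String) (w : String) : List String :=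
  match PySem.List.index? xs w with
  | none => xs  -- xs.index(w): ValueError, unreachable (w ∈ xs at every call site)
  | some j => xs.take j ++ xs.drop (j + 1)

-- Termination potential for the stack machine (proof artefacts, not part of Source B).
def cB : Nat → Nat
  | 0 => 2
  | m + 1 => m * cB m + 4

def phiB (n i : Nat) : Nat := (n - i) * cB n + 1

def stkSum : Nat → List (Nat × String) → Nat
  | _, [] => 0
  | n, (j, _) :: s => phiB n (j + 1) + stkSum (n + 1) s

def muB (rem : List String) (stk : List (Nat × String)) (st : Option Nat) : Nat :=
  (match st with
   | none => phiB rem.length 0 + 2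
   | some i => phiB rem.length i) + stkSum (rem.length + 1) stk

theorem two_le_cB (m : Nat) : 2 ≤ cB m := by
  cases m with
  | zero => simp [cB]
  | succ k => exact (by norm_num : (2:Nat) ≤ 4).trans (Nat.le_add_left 4 _)

theorem wfB_eq_erase (xs : List String) (w : String) (hw : w ∈ xs) :
    wfB xs w = xs.erase w := by
  rcases h : PySem.List.index? xs w with _ | j
  · exact absurd hw ((PySem.List.index?_eq_none_iff xs w).mp h)
  · obtain ⟨pre, suf, rfl, hlen, hnot⟩ := (PySem.List.index?_eq_some_iff _ w j).mp h
    subst hlen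
    simp only [wfB, h]
    rw [List.erase_append_right _ hnot, List.erase_cons_head]
    have ht : (pre ++ w :: suf).take pre.length = pre := List.take_left ..
    have hd : (pre ++ w :: suf).drop (pre.length + 1) = suf := by
      rw [show pre ++ w :: suf = (pre ++ [w]) ++ suf by simp,
          show pre.length + 1 = (pre ++ [w]).length by simp, List.drop_left]
    rw [ht, hd]

theorem length_wfB (xs : List String) (w : String) (hw : w ∈ xs) :
    (wfB xs w).length + 1 = xs.length := by
  rw [wfB_eq_erase xs w hw, List.length_erase_of_mem hw]
  exact Nat.succ_pred_eq_of_pos (List.length_pos_of_mem hw)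

theorem phiB_pos (n i : Nat) : 0 < phiB n i := by
  unfold phiB; exact Nat.succ_pos _

theorem phiB_lt (n i : Nat) (h : i < n) : phiB n (i + 1) < phiB n i := by
  have hc := two_le_cB n
  have e : n - i = (n - (i + 1)) + 1 := by omega
  simp only [phiB]
  rw [e, Nat.succ_mul]
  generalize (n - (i + 1)) * cB n = B
  omega

theorem key_push (m i : Nat) (hi : i < m + 1) :
    phiB m 0 + 2 + phiB (m + 1) (i + 1) < phiB (m + 1) i := by
  have e1 : m + 1 - (i + 1) = m - i := by omega
  have e2 : m + 1 - i = (m - i) + 1 := by omega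
  simp only [phiB, e1, e2, Nat.succ_mul, Nat.sub_zero, cB]
  generalize (m - i) * (m * cB m + 4) = B
  generalize m * cB m = A
  omega

-- the machine: st = none is the 'entering' phase, st = some i the scan of rem at index i
def runB (rem path : List String) (stk : List (Nat × String)) (st : Option Nat) :
    Option (List String) :=
  match st with
  | none =>
    if rem = [] then some path
    else runB rem path stk (some 0)
  | some i =>
    if h : i < rem.length then
      let w := rem[i]
      match PySem.List.pyGet? path (-1) with
      | none => none  -- path[-1]: IndexError (path never empty on real runs)
      | some lastw =>
        match PySem.Str.pyGet? lastw (-1), PySem.Str.pyGet? w 0 with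
        | some c1, some c2 =>
          if c1 = c2 then runB (wfB rem w) (path ++ [w]) ((i, w) :: stk) none
          else runB rem path stk (some (i + 1))
        | _, _ => none  -- empty word: IndexError (excluded by Pre_)
    else
      match stk with
      | [] => none
      | (j, w) :: stk' => runB (rem ++ [w]) (wfB path w) stk' (some (j + 1))
termination_by muB rem stk st
decreasing_by
  · simp only [muB]; omega
  · have hw : rem[i] ∈ rem := List.getElem_mem h
    obtain ⟨m, hm⟩ : ∃ m, rem.length = m + 1 := ⟨rem.length - 1, by omega⟩
    have hl : (wfB rem rem[i]).length = m := by
      have := length_wfB rem rem[i] hw; omega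
    have hk := key_push m i (by omega)
    simp only [muB, stkSum, hl, hm]
    rw [show m + 1 + 1 = m + 2 from by omega]
    omega
  · have := phiB_lt rem.length i h
    simp only [muB]; omega
  · have := phiB_pos rem.length i
    simp only [muB, stkSum, List.length_append, List.length_cons, List.length_nil,
      Nat.zero_add]
    omega

def outerB (L : List String) : List String → Option (List String)
  | [] => none
  | s :: ss =>
    match runB (wfB L s) [s] [] none with
    | some r => some r
    | none => outerB L ss

def makeWordLadder_alt (L : List String) : Option (List String) :=
  if L = [] then some [] else outerB L L

-- ===== PRECONDITION & SPEC =====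
-- Pre_ excludes exactly the inputs on which A raises IndexError: a list of two or
-- more words one of which is the empty string ("" as a lone element is fine).
def Pre_makeWordLadder (L : List String) : Prop := L.length ≤ 1 ∨ "" ∉ L
instance (L : List String) : Decidable (Pre_makeWordLadder L) := by
  unfold Pre_makeWordLadder; infer_instance

def pvWitness_makeWordLadder : List String := ["ab", "ba"]

def Spec_makeWordLadder (L : List String) (out : Option (List String)) : Prop := out = makeWordLadder_alt L
instance (L : List String) (out : Option (List String)) : Decidable (Spec_makeWordLadder L out) := by unfold Spec_makeWordLadder; infer_instance

-- ===== CLAIM (what is proved, stated in full; the proofs are below) =====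
def Claim_equal_makeWordLadder : Prop := ∀ (L : List String), Dom_makeWordLadder L → Pre_makeWordLadder L → Spec_makeWordLadder L (makeWordLadder L)

-- ===== LEMMAS AND PROOFS =====

-- resuming A's suspended loops from the final (permuted) lists a failed call returns
def unwindA : List (Nat × String) → List String × List String → Option (List String)
  | [], _ => none
  | (j, w) :: stk', (L, nl) =>
    if w ∈ nl then
      match loopA (L ++ [w]) (nl.erase w) (j + 1) (L.length + 1) with
      | Sum.inl s => some s
      | Sum.inr ⟨p, _⟩ => unwindA stk' p
    else none

theorem str_ne_toList {s : String} (h : s ≠ "") : s.toList ≠ [] := by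
  intro hn
  exact h (by have := congrArg String.ofList hn; simpa using this)

theorem str_last_some {s : String} (h : s ≠ "") : ∃ c, PySem.Str.pyGet? s (-1) = some c := by
  rw [show PySem.Str.pyGet? s (-1) = PySem.List.pyGet? s.toList (-1) from by
        simp [PySem.Str.pyGet?], PySem.List.pyGet?_neg_one]
  exact Option.ne_none_iff_exists'.mp
    (by simpa [List.getLast?_eq_none_iff] using str_ne_toList h)

theorem str_head_some {s : String} (h : s ≠ "") : ∃ c, PySem.Str.pyGet? s 0 = some c := by
  rw [show PySem.Str.pyGet? s 0 = PySem.List.pyGet? s.toList 0 from by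
        simp [PySem.Str.pyGet?], PySem.List.pyGet?_zero]
  exact Option.ne_none_iff_exists'.mp (by simpa using str_ne_toList h)

theorem simB : ∀ (rem path : List String) (stk : List (Nat × String)) (st : Option Nat),
    (∀ x ∈ rem, x ≠ "") → (∀ x ∈ path, x ≠ "") →
    (∃ s0, path.Perm (s0 :: stk.map Prod.snd)) →
    runB rem path stk st = Sum.elim some (fun q => unwindA stk q.1)
      (st.elim (helperA rem path) (fun i => loopA rem path i rem.length)) := by
  intro rem path stk st
  induction rem, path, stk, st using runB.induct with
  | case1 path stk =>
    intro _ _ _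
    rw [runB]
    simp [helperA, Option.elim_none]
  | case2 rem path stk hne ih =>
    intro hrem hpath hperm
    rw [runB]
    simp only [if_neg hne]
    rw [ih hrem hpath hperm, helperA]
    simp [hne, Option.elim_some, Option.elim_none]
  | case3 rem path stk j hj hnone =>
    intro hrem hpath hperm
    obtain ⟨s0, hp⟩ := hperm
    have : path ≠ [] := by
      intro h0; have := hp.length_eq; simp [h0] at this
    rw [PySem.List.pyGet?_neg_one, List.getLast?_eq_none_iff] at hnone
    exact absurd hnone this
  | case4 rem path stk j h w word1 h1 c2 hc2 hc1 ih =>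
    have hweq : w = rem[j] := rfl
    clear_value w
    subst hweq
    intro hrem hpath hperm
    obtain ⟨s0, hp⟩ := hperm
    have hwmem : rem[j] ∈ rem := List.getElem_mem h
    have hrem' : ∀ x ∈ wfB rem rem[j], x ≠ "" := by
      rw [wfB_eq_erase rem rem[j] hwmem]
      exact fun x hx => hrem x (List.mem_of_mem_erase hx)
    have hpath' : ∀ x ∈ path ++ [rem[j]], x ≠ "" := by
      intro x hx
      rcases List.mem_append.mp hx with hx | hx
      · exact hpath x hx
      · simpa using (List.mem_singleton.mp hx) ▸ hrem _ hwmem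
    have hperm' : ∃ t0, (path ++ [rem[j]]).Perm
        (t0 :: ((j, rem[j]) :: stk).map Prod.snd) := by
      refine ⟨s0, ?_⟩
      simp only [List.map_cons]
      exact ((List.perm_append_singleton _ _).trans (hp.cons _)).trans
        (List.Perm.swap _ _ _)
    rw [runB.eq_def]
    simp only [dif_pos h, h1, hc1, hc2]
    rw [ih hrem' hpath' hperm', wfB_eq_erase rem rem[j] hwmem]
    simp only [Option.elim_some, Option.elim_none]
    rw [loopA.eq_def]
    simp only [dif_pos h, h1, PySem.List.pyGet?_ofNat rem j h, hc1, hc2,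
      dif_pos hwmem]
    cases hres : helperA (rem.erase rem[j]) (path ++ [rem[j]]) with
    | inl s => simp
    | inr q =>
      obtain ⟨⟨L3, nl3⟩, hp2⟩ := q
      have hw_nl3 : rem[j] ∈ nl3 := hp2.2.mem_iff.mpr (by simp)
      have hlen3 : L3.length + 1 = rem.length := by
        have h5 : L3.length = rem.length - 1 := by
          rw [hp2.1.length_eq, List.length_erase_of_mem hwmem]
        have h7 := List.length_pos_of_mem hwmem
        omega
      simp only [Sum.elim_inr, dif_pos hw_nl3]
      simp only [unwindA, if_pos hw_nl3, hlen3]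
      cases loopA (L3 ++ [rem[j]]) (nl3.erase rem[j]) (j + 1) rem.length with
      | inl s => simp
      | inr q2 => simp
  | case5 rem path stk j h w word1 h1 c1 c2 hc2 hc1 hne ih =>
    have hweq : w = rem[j] := rfl
    clear_value w
    subst hweq
    intro hrem hpath hperm
    rw [runB.eq_def]
    simp only [dif_pos h, h1, hc1, hc2, if_neg hne]
    rw [ih hrem hpath hperm]
    simp only [Option.elim_some]
    conv_rhs => rw [loopA.eq_def]
    simp only [dif_pos h, h1, PySem.List.pyGet?_ofNat rem j h, hc1, hc2, if_neg hne]
  | case6 rem path stk j h w word1 h1 hfail =>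
    have hweq : w = rem[j] := rfl
    clear_value w
    subst hweq
    intro hrem hpath hperm
    exfalso
    have hw1 : word1 ∈ path := PySem.List.mem_of_pyGet?_eq_some path h1
    obtain ⟨c1, hc1⟩ := str_last_some (hpath word1 hw1)
    obtain ⟨c2, hc2⟩ := str_head_some (hrem rem[j] (List.getElem_mem h))
    exact hfail c1 c2 hc1 hc2
  | case7 rem path j hj =>
    intro hrem hpath hperm
    rw [runB]
    simp only [dif_neg hj, Option.elim_some]
    rw [loopA.eq_def]
    simp [dif_neg hj, unwindA]
  | case8 rem path j hj j1 w stk' ih =>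
    intro hrem hpath hperm
    obtain ⟨s0, hp⟩ := hperm
    have hw_path : w ∈ path := hp.mem_iff.mpr (by simp)
    have hrem' : ∀ x ∈ rem ++ [w], x ≠ "" := by
      intro x hx
      rcases List.mem_append.mp hx with hx | hx
      · exact hrem x hx
      · exact (List.mem_singleton.mp hx) ▸ hpath w hw_path
    have hpath' : ∀ x ∈ wfB path w, x ≠ "" := by
      rw [wfB_eq_erase path w hw_path]
      exact fun x hx => hpath x (List.mem_of_mem_erase hx)
    have hperm' : ∃ t0, (wfB path w).Perm (t0 :: stk'.map Prod.snd) := by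
      refine ⟨s0, ?_⟩
      rw [wfB_eq_erase path w hw_path]
      have he := hp.erase w
      simp only [List.map_cons] at he
      by_cases hsw : s0 = w
      · subst hsw
        rw [List.erase_cons_head] at he
        exact he.trans (by simp)
      · rw [List.erase_cons_tail (by simp [hsw]), List.erase_cons_head] at he
        exact he
    rw [runB]
    simp only [dif_neg hj]
    rw [ih hrem' hpath' hperm', wfB_eq_erase path w hw_path]
    simp only [Option.elim_some]
    conv_rhs => rw [loopA.eq_def]
    simp only [dif_neg hj, Sum.elim_inr]
    simp only [unwindA, if_pos hw_path, List.length_append, List.length_cons,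
      List.length_nil, Nat.zero_add]
    cases loopA (rem ++ [w]) (path.erase w) (j1 + 1) (rem.length + 1) with
    | inl s => simp
    | inr q2 => simp

-- ===== VERDICT (by name: the statement is the Claim_ definition above) =====
theorem outer_agree (L : List String) (hnin : "" ∉ L) :
    ∀ ws : List String, (∀ x ∈ ws, x ∈ L) → outerA L ws = outerB L ws := by
  intro ws
  induction ws with
  | nil => intro _; rfl
  | cons w ws ihw =>
    intro hsub
    have hwL : w ∈ L := hsub w (List.mem_cons_self)
    have hro : PySem.List.remove? L w = some (L.erase w) :=
      PySem.List.remove?_eq_some_erase L w hwL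
    simp only [outerA, outerB, hro, wfB_eq_erase L w hwL]
    have hsim := simB (L.erase w) [w] [] none
      (fun x hx h0 => hnin (h0 ▸ List.mem_of_mem_erase hx))
      (fun x hx => by
        have : x = w := by simpa using hx
        exact this ▸ fun h0 => hnin (h0 ▸ hwL))
      ⟨w, by simp⟩
    rw [hsim]
    simp only [Option.elim_none]
    cases helperA (L.erase w) [w] with
    | inl s => simp
    | inr q =>
      simp only [Sum.elim_inr, unwindA]
      exact ihw (fun x hx => hsub x (List.mem_cons_of_mem _ hx))

theorem makeWordLadder_spec : Claim_equal_makeWordLadder := by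
  intro L _ hpre
  unfold Spec_makeWordLadder
  by_cases hL : L = []
  · subst hL; rfl
  · rw [makeWordLadder, makeWordLadder_alt]
    simp only [if_neg hL]
    rcases hpre with hlen | hnin
    · obtain ⟨x, rfl⟩ : ∃ x, L = [x] := by
        cases L with
        | nil => exact absurd rfl hL
        | cons a t =>
          cases t with
          | nil => exact ⟨a, rfl⟩
          | cons b t2 => simp at hlen
      have hA : outerA [x] [x] = some [x] := by
        simp [outerA, helperA]
      have hB : outerB [x] [x] = some [x] := by
        have hwf : wfB [x] x = [] := by
          simp [wfB]
        simp only [outerB, hwf]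
        rw [runB]
        simp
      rw [hA, hB]
    · exact outer_agree L hnin L (fun _ hx => hx)
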